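-- pv_equiv track=rewrite | github.com/gosch/Katas-in-python | 2019/december/maxSumSegments.py | maxSumSegments
-- ===== SOURCE A (Python) =====
-- def maxSumSegments(inputArray):
--     r = []
--     r.append(inputArray.index(max(inputArray)))
--     s = 2
--
--     while s <= len(inputArray):
--         t = [sum([inputArray[i + j] for j in range(s)]) for i in range(len(inputArray) - s + 1)]
--         r.append(t.index(max(t)))
--         s += 1
--     return r
-- ===== SOURCE B (Python) =====
-- def maxSumSegments(inputArray):
--     n = len(inputArray)
--     prefix = [0]
--     for x in inputArray:
--         prefix.append(prefix[-1] + x)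
--     r = []
--     for s in range(1, n + 1):
--         best = prefix[s] - prefix[0]
--         best_i = 0
--         for i in range(1, n - s + 1):
--             w = prefix[i + s] - prefix[i]
--             if w > best:
--                 best = w
--                 best_i = i
--         r.append(best_i)
--     return r
-- ===== Notes on version B (the rewrite author's own statement) =====
-- stated objective: faster
-- what changed: Replaces A's per-window recomputation of each segment sum (sum over a fresh comprehension for every start index and length, then a separate max/index pass) by a prefix-sum array built once, with each length handled in one pass that tracks the first maximal window index directly.
import Mathlib
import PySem

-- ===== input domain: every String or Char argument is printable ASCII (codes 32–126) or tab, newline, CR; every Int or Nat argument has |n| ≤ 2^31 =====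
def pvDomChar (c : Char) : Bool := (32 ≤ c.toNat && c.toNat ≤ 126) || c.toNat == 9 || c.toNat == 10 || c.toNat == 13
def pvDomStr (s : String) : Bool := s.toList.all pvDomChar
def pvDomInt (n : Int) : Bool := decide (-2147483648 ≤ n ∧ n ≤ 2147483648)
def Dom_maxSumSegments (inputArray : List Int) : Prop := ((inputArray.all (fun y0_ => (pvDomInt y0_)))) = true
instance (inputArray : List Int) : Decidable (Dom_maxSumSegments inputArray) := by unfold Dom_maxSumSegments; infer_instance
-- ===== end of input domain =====

-- B builds a prefix-sum array once and, per segment length, scans windows in one pass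
-- tracking the first maximal window index, instead of A's per-window re-summation; the
-- timing run measured B faster (asymptotic: O(n^2) vs O(n^3) work).


-- ===== PORT A =====
-- l.index(max(l)); the none branch is Python's ValueError on an empty l, unreachable under Pre_
def pvIdxMax (l : List Int) : Int :=
  match PySem.List.max? l (fun x => x) with
  | none => 0
  | some m => ((PySem.List.index? l m).getD 0 : Nat)

def maxSumSegments (inputArray : List Int) : List Int :=
  (PySem.List.pyRange 2 ((inputArray.length : Int) + 1) 1).foldl
    (fun r s =>
      let t := (PySem.List.pyRange 0 ((inputArray.length : Int) - s + 1) 1).map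
        (fun i => ((PySem.List.pyRange 0 s 1).map (fun j => PySem.List.pyGetD inputArray (i + j) 0)).sum)
      r ++ [pvIdxMax t])
    [pvIdxMax inputArray]

-- ===== PORT B =====
-- prefix = [0]; for x in inputArray: prefix.append(prefix[-1] + x)
def pvPrefix (xs : List Int) : List Int :=
  xs.foldl (fun p x => p ++ [PySem.List.pyGetD p (-1) 0 + x]) [0]

def maxSumSegments_alt (inputArray : List Int) : List Int :=
  let pre := pvPrefix inputArray
  (PySem.List.pyRange 1 ((inputArray.length : Int) + 1) 1).foldl
    (fun r s =>
      let bb := (PySem.List.pyRange 1 ((inputArray.length : Int) - s + 1) 1).foldl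
        (fun bb i =>
          let w := PySem.List.pyGetD pre (i + s) 0 - PySem.List.pyGetD pre i 0
          if w > bb.1 then (w, i) else bb)
        (PySem.List.pyGetD pre s 0 - PySem.List.pyGetD pre 0 0, 0)
      r ++ [bb.2])
    []

-- ===== PRECONDITION & SPEC =====
-- A raises ValueError (max() of an empty sequence) on the empty list; Pre_ excludes exactly that input.
def Pre_maxSumSegments (inputArray : List Int) : Prop := inputArray ≠ []
instance (inputArray : List Int) : Decidable (Pre_maxSumSegments inputArray) := by unfold Pre_maxSumSegments; infer_instance
def pvWitness_maxSumSegments : List Int := [1, -2, 3]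

def Spec_maxSumSegments (inputArray : List Int) (out : List Int) : Prop := out = maxSumSegments_alt inputArray
instance (inputArray : List Int) (out : List Int) : Decidable (Spec_maxSumSegments inputArray out) := by unfold Spec_maxSumSegments; infer_instance

-- ===== CLAIM (what is proved, stated in full; the proofs are below) =====
def Claim_equal_maxSumSegments : Prop := ∀ (inputArray : List Int), Dom_maxSumSegments inputArray → Pre_maxSumSegments inputArray → Spec_maxSumSegments inputArray (maxSumSegments inputArray)

-- ===== LEMMAS AND PROOFS =====

-- pvPrefix xs is the list of partial sums of xs
theorem pvPrefix_eq (xs : List Int) :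
    pvPrefix xs = (List.range (xs.length + 1)).map (fun k => (xs.take k).sum) := by
  induction xs using List.reverseRecOn with
  | nil => rfl
  | append_singleton ys y ih =>
    unfold pvPrefix at *
    rw [List.foldl_append, ih]
    simp only [List.foldl_cons, List.foldl_nil]
    rw [List.range_succ, List.map_append]
    simp only [List.map_cons, List.map_nil]
    rw [PySem.List.pyGetD_neg_one_append_singleton]
    rw [List.length_append, List.length_singleton, List.range_succ, List.map_append,
        List.range_succ, List.map_append]
    simp only [List.map_cons, List.map_nil]
    congr 1
    · congr 1
      · apply List.map_congr_left
        intro k hk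
        simp only [List.mem_range] at hk
        rw [List.take_append_of_le_length (by omega)]
      · rw [List.take_append_of_le_length (le_refl ys.length)]
    · simp [List.take_of_length_le]

theorem pvPrefix_getD (xs : List Int) (i : Int) (h0 : 0 ≤ i) (h1 : i ≤ (xs.length : Int)) :
    PySem.List.pyGetD (pvPrefix xs) i 0 = (xs.take i.toNat).sum := by
  rw [pvPrefix_eq, PySem.List.pyGetD_of_nonneg (h := h0)]
  rw [List.getD_eq_getElem?_getD, List.getElem?_map, List.getElem?_range (by omega)]
  rfl

-- a window sum via prefix sums
theorem pvWindowSum_eq (xs : List Int) (i s : Int) (h0 : 0 ≤ i) (hs : 0 ≤ s)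
    (h1 : i + s ≤ (xs.length : Int)) :
    PySem.List.pyGetD (pvPrefix xs) (i + s) 0 - PySem.List.pyGetD (pvPrefix xs) i 0
      = ((xs.drop i.toNat).take s.toNat).sum := by
  rw [pvPrefix_getD xs (i+s) (by omega) (by omega), pvPrefix_getD xs i h0 (by omega)]
  have h2 : (i + s).toNat = i.toNat + s.toNat := by omega
  rw [h2, List.take_add, List.sum_append]
  omega

-- A's inner comprehension sum equals the window sum
theorem pvInnerSum_eq (xs : List Int) (i s : Int) (h0 : 0 ≤ i) (hs : 0 ≤ s)
    (h1 : i + s ≤ (xs.length : Int)) :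
    ((PySem.List.pyRange 0 s 1).map (fun j => PySem.List.pyGetD xs (i + j) 0)).sum
      = ((xs.drop i.toNat).take s.toNat).sum := by
  congr 1
  rw [PySem.List.pyRange_one, List.map_map]
  apply List.ext_getElem
  · simp; omega
  · intro k hk1 hk2
    simp only [List.getElem_map, List.getElem_range, Function.comp_apply]
    rw [List.getElem_take, List.getElem_drop]
    simp only [List.length_map, List.length_range] at hk1
    rw [PySem.List.pyGetD_eq_getElem xs 0 (by omega) (by omega)]
    congr 1
    omega

-- the first-max tracking fold computes max? and the first index of the max
theorem firstmax_fold (w : Int → Int) (m : Nat) (hm : 1 ≤ m) :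
    PySem.List.max? ((PySem.List.pyRange 0 (m : Int) 1).map w) (fun x => x)
      = some (((PySem.List.pyRange 1 (m : Int) 1).foldl
          (fun bb i => if w i > bb.1 then (w i, i) else bb) (w 0, 0)).1) ∧
    PySem.List.index? ((PySem.List.pyRange 0 (m : Int) 1).map w)
        (((PySem.List.pyRange 1 (m : Int) 1).foldl
          (fun bb i => if w i > bb.1 then (w i, i) else bb) (w 0, 0)).1)
      = some (((PySem.List.pyRange 1 (m : Int) 1).foldl
          (fun bb i => if w i > bb.1 then (w i, i) else bb) (w 0, 0)).2).toNat ∧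
    0 ≤ (((PySem.List.pyRange 1 (m : Int) 1).foldl
          (fun bb i => if w i > bb.1 then (w i, i) else bb) (w 0, 0)).2) := by
  induction m, hm using Nat.le_induction with
  | base =>
    have h1 : PySem.List.pyRange 1 (1 : Int) 1 = [] := PySem.List.pyRange_one_eq_nil (by omega)
    have h0 : PySem.List.pyRange 0 (1 : Int) 1 = [0] := by
      have := PySem.List.pyRange_one_singleton (a := (0 : Int)); simpa using this
    rw [Nat.cast_one, h1, h0]
    refine ⟨rfl, ?_, le_refl 0⟩
    simp only [List.foldl_nil, List.map_cons, List.map_nil]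
    rw [PySem.List.index?_cons_self]
    rfl
  | succ m hm ih =>
    have hcast : ((m + 1 : Nat) : Int) = (m : Int) + 1 := by push_cast; ring
    rw [hcast,
        PySem.List.pyRange_one_succ_right (a := 1) (b := (m : Int)) (by exact_mod_cast hm),
        PySem.List.pyRange_one_succ_right (a := 0) (b := (m : Int)) (by positivity),
        List.foldl_append, List.map_append]
    simp only [List.foldl_cons, List.foldl_nil, List.map_cons, List.map_nil]
    set F := (PySem.List.pyRange 1 (m : Int) 1).foldl
          (fun bb i => if w i > bb.1 then (w i, i) else bb) (w 0, 0) with hF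
    set t := (PySem.List.pyRange 0 (m : Int) 1).map w with ht
    obtain ⟨ih1, ih2, ih3⟩ := ih
    have hmem : F.1 ∈ t := (PySem.List.index?_isSome_iff _ _).mp (by rw [ih2]; rfl)
    have hle : ∀ y ∈ t, y ≤ F.1 := fun y hy => PySem.List.max?_isMax ih1 y hy
    by_cases hgt : F.1 < w (m : Int)
    · have hstep : (if w (m : Int) > F.1 then (w (m : Int), (m : Int)) else F)
          = (w (m : Int), (m : Int)) := if_pos hgt
      rw [hstep]
      refine ⟨?_, ?_, by positivity⟩
      · simp only [PySem.List.max?] at ih1 ⊢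
        rw [List.foldl_append, ih1]
        simp [hgt]
      · have hnot : w (m : Int) ∉ t := fun hmemw => absurd (hle _ hmemw) (by omega)
        show PySem.List.index? (t ++ [w (m:Int)]) (w (m:Int)) = some ((m:Int)).toNat
        rw [PySem.List.index?_append_singleton_self t _ hnot]
        have : t.length = m := by
          rw [ht, List.length_map, PySem.List.length_pyRange_one]; omega
        simp [this]
    · have hstep : (if w (m : Int) > F.1 then (w (m : Int), (m : Int)) else F) = F := if_neg hgt
      rw [hstep]
      refine ⟨?_, ?_, ih3⟩
      · simp only [PySem.List.max?] at ih1 ⊢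
        rw [List.foldl_append, ih1]
        simp [hgt]
      · rw [PySem.List.index?_append_of_mem _ hmem, ih2]

theorem pvIdxMax_eq_fold (w : Int → Int) (m : Nat) (hm : 1 ≤ m) :
    pvIdxMax ((PySem.List.pyRange 0 (m : Int) 1).map w)
      = ((PySem.List.pyRange 1 (m : Int) 1).foldl
          (fun bb i => if w i > bb.1 then (w i, i) else bb) (w 0, 0)).2 := by
  obtain ⟨h1, h2, h3⟩ := firstmax_fold w m hm
  unfold pvIdxMax
  rw [h1]
  dsimp only
  rw [h2]
  simp only [Option.getD_some]
  omega

-- per-length equality: A's index-of-max of the window-sum list is B's tracked fold index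
theorem elem_eq (xs : List Int) (s : Int) (hs1 : 1 ≤ s) (hs2 : s ≤ (xs.length : Int)) :
    pvIdxMax ((PySem.List.pyRange 0 ((xs.length : Int) - s + 1) 1).map
        (fun i => ((PySem.List.pyRange 0 s 1).map (fun j => PySem.List.pyGetD xs (i + j) 0)).sum))
      = ((PySem.List.pyRange 1 ((xs.length : Int) - s + 1) 1).foldl
          (fun bb i =>
            if (PySem.List.pyGetD (pvPrefix xs) (i + s) 0 - PySem.List.pyGetD (pvPrefix xs) i 0) > bb.1
            then (PySem.List.pyGetD (pvPrefix xs) (i + s) 0 - PySem.List.pyGetD (pvPrefix xs) i 0, i)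
            else bb)
          (PySem.List.pyGetD (pvPrefix xs) s 0 - PySem.List.pyGetD (pvPrefix xs) 0 0, 0)).2 := by
  set w : Int → Int := fun i => PySem.List.pyGetD (pvPrefix xs) (i + s) 0 - PySem.List.pyGetD (pvPrefix xs) i 0 with hw
  set m : Nat := ((xs.length : Int) - s + 1).toNat with hmdef
  have hm : 1 ≤ m := by omega
  have hcast : ((m : Int)) = (xs.length : Int) - s + 1 := by omega
  have hinit : (PySem.List.pyGetD (pvPrefix xs) s 0 - PySem.List.pyGetD (pvPrefix xs) 0 0, (0:Int)) = (w 0, 0) := by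
    simp [hw]
  rw [← hcast, hinit]
  rw [show (fun (bb : Int × Int) i =>
            if (PySem.List.pyGetD (pvPrefix xs) (i + s) 0 - PySem.List.pyGetD (pvPrefix xs) i 0) > bb.1
            then (PySem.List.pyGetD (pvPrefix xs) (i + s) 0 - PySem.List.pyGetD (pvPrefix xs) i 0, i)
            else bb) = (fun (bb : Int × Int) i => if w i > bb.1 then (w i, i) else bb) from rfl]
  rw [← pvIdxMax_eq_fold w m hm]
  congr 1
  apply List.map_congr_left
  intro i hi
  rw [PySem.List.mem_pyRange_one] at hi
  rw [pvInnerSum_eq xs i s (by omega) (by omega) (by omega),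
      ← pvWindowSum_eq xs i s (by omega) (by omega) (by omega)]

-- A's first appended element (index of max element) is the s = 1 window-sum case
theorem head_eq (xs : List Int) (hne : xs ≠ []) :
    pvIdxMax xs
      = pvIdxMax ((PySem.List.pyRange 0 ((xs.length : Int) - 1 + 1) 1).map
          (fun i => ((PySem.List.pyRange 0 1 1).map (fun j => PySem.List.pyGetD xs (i + j) 0)).sum)) := by
  congr 1
  have h1 : PySem.List.pyRange 0 (1 : Int) 1 = [0] := by
    have := PySem.List.pyRange_one_singleton (a := (0 : Int)); simpa using this
  rw [h1]
  simp only [List.map_cons, List.map_nil, List.sum_cons, List.sum_nil, add_zero]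
  rw [show (xs.length : Int) - 1 + 1 = (xs.length : Int) from by ring]
  exact (PySem.List.map_pyGetD_pyRange_zero' xs 0).symm

theorem main_eq (xs : List Int) (hne : xs ≠ []) : maxSumSegments xs = maxSumSegments_alt xs := by
  have hn : 1 ≤ xs.length := List.length_pos_iff.mpr hne
  show (PySem.List.pyRange 2 ((xs.length : Int) + 1) 1).foldl
    (fun r s => r ++ [pvIdxMax ((PySem.List.pyRange 0 ((xs.length : Int) - s + 1) 1).map
        (fun i => ((PySem.List.pyRange 0 s 1).map (fun j => PySem.List.pyGetD xs (i + j) 0)).sum))])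
    [pvIdxMax xs]
    = (PySem.List.pyRange 1 ((xs.length : Int) + 1) 1).foldl
    (fun r s => r ++ [((PySem.List.pyRange 1 ((xs.length : Int) - s + 1) 1).foldl
        (fun bb i =>
          if (PySem.List.pyGetD (pvPrefix xs) (i + s) 0 - PySem.List.pyGetD (pvPrefix xs) i 0) > bb.1
          then (PySem.List.pyGetD (pvPrefix xs) (i + s) 0 - PySem.List.pyGetD (pvPrefix xs) i 0, i)
          else bb)
        (PySem.List.pyGetD (pvPrefix xs) s 0 - PySem.List.pyGetD (pvPrefix xs) 0 0, 0)).2])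
    []
  rw [PySem.List.foldl_append_singleton_eq_map, PySem.List.foldl_append_singleton_eq_map]
  rw [PySem.List.pyRange_one_cons (a := 1) (b := (xs.length : Int) + 1) (by exact_mod_cast by omega)]
  rw [List.map_cons]
  rw [show ((1 : Int) + 1) = 2 from rfl]
  rw [List.nil_append, List.singleton_append]
  congr 1
  · rw [head_eq xs hne, elem_eq xs 1 le_rfl (by exact_mod_cast hn)]
  · apply List.map_congr_left
    intro s hs
    rw [PySem.List.mem_pyRange_one] at hs
    exact elem_eq xs s (by omega) (by omega)

-- ===== VERDICT (by name: the statement is the Claim_ definition above) =====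
theorem maxSumSegments_spec : Claim_equal_maxSumSegments := by
  intro xs _ hpre
  unfold Spec_maxSumSegments
  exact main_eq xs hpre
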